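-- pv_equiv track=rewrite | github.com/olga3n/adventofcode | 2018/14-chocolate-charts-1.py | process
-- ===== SOURCE A (Python) =====
-- class Node(object):
--
--     def __init__(self, val, ind, left, right):
--         self.ind = ind
--         self.val = val
--
--         self.left = left
--         self.right = right
--
-- def process(steps, first, second, N=10):
--
--     n1 = Node(first, 0, None, None)
--     n2 = Node(second, 1, None, None)
--
--     n1.left = n2
--     n1.right = n2
--
--     n2.left = n1
--     n2.right = n1
--
--     last = n2
--
--     while True:
--         new_vals = str(n1.val + n2.val)
--
--         for new_val in new_vals:
--             n_new = Node(int(new_val), last.ind + 1, last, last.right)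
--
--             last.right = n_new
--             last = n_new
--
--         if last.ind >= steps + N - 1:
--             while last.ind != steps + N - 1:
--                 last = last.left
--
--             break
--
--         n1_steps = n1.val + 1
--         n2_steps = n2.val + 1
--
--         for i in range(n1_steps):
--             n1 = n1.right
--
--         for i in range(n2_steps):
--             n2 = n2.right
--
--     result = ''
--
--     for i in range(N):
--         result = str(last.val) + result
--         last = last.left
--
--     return result
-- ===== SOURCE B (Python) =====
-- def process(steps, first, second, N=10):
--     scores = [first, second]
--     i1, i2 = 0, 1
--     total = steps + N
--     while len(scores) < total:
--         s = scores[i1] + scores[i2]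
--         for c in str(s):
--             scores.append(int(c))
--         i1 = (i1 + 1 + scores[i1]) % len(scores)
--         i2 = (i2 + 1 + scores[i2]) % len(scores)
--     return ''.join(str(d) for d in scores[steps:steps + N])
-- ===== Notes on version B (the rewrite author's own statement) =====
-- stated objective: simpler
-- what changed: Replaces the hand-built circular doubly-linked Node list (pointer chasing node-by-node for cursor moves, a backtracking walk along left pointers, result built by prepending while walking left) with a flat score list, two modular integer cursors and a plain slice join; same O(steps+N) work but without per-node Python objects and attribute chasing, which a timing run measured as a growing constant-factor win.
-- outside the precondition, e.g. on process(0, 3, 7, 0): A does not finish within the time limit, B returns ''; on process(-1, 3, 7, 3): A returns '737', B returns '7'; on process(5, -1, 3, 2): A raises ValueError, B raises ValueError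
import Mathlib
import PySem

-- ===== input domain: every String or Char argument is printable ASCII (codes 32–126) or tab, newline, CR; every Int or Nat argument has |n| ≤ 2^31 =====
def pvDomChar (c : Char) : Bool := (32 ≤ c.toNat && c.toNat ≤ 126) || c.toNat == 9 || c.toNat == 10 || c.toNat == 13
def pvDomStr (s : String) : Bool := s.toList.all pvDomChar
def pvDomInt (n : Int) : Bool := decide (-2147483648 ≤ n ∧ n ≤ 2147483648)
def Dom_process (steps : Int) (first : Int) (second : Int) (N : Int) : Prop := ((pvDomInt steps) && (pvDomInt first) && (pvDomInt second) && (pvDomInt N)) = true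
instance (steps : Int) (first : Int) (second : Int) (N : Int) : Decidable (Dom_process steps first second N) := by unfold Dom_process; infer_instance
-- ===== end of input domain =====

-- B replaces A's hand-built circular doubly-linked Node list by a flat score list with two
-- modular cursors and an arithmetic digit split (objective: simpler).


-- ===== PORT A =====
-- Heap model of A's Node objects: a node is its index `ind`, `vals` holds each node's `val`.
-- A's pointer structure satisfies, at every moment of the run:
--   node k .right = node k+1, except the last node, whose right points back to node 0;
--   node k .left  = node k-1, except node 0, whose left still points to node 1 (never updated).
def pvRight (len k : Nat) : Nat := if k + 1 = len then 0 else k + 1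
def pvLeft (k : Nat) : Nat := if k = 0 then 1 else k - 1
-- int(new_val) on one character of str(...); none = ValueError lies outside Pre_process
def pvDigit (c : Char) : Int := (PySem.Int.ofStr? (String.ofList [c])).getD 0
def pvDigits (s : Int) : List Int := (PySem.Int.toStr s).toList.map pvDigit
-- `for new_val in new_vals:` — append a node per digit, moving `last`
def pvAppend (p : List Int × Nat) (ds : List Int) : List Int × Nat :=
  ds.foldl (fun q d => (q.1 ++ [d], q.1.length)) p
-- `for i in range(m): n = n.right`
def pvWalkRight (len : Nat) (k : Nat) : Nat → Nat
  | 0 => k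
  | m + 1 => pvWalkRight len (pvRight len k) m
-- `while last.ind != steps + N - 1: last = last.left`  (fuel; exhaustion unreachable under Pre_process)
def pvWalkBack (target : Int) : Nat → Nat → Nat
  | 0, k => k
  | f + 1, k => if (k : Int) = target then k else pvWalkBack target f (pvLeft k)
-- the `while True:` loop (fuel; every pass appends at least one node, so the supplied fuel suffices)
def pvLoopA (total : Int) : Nat → List Int → Nat → Nat → Nat → List Int × Nat
  | 0, vals, _, _, last => (vals, last)
  | f + 1, vals, n1, n2, last =>
    let p := pvAppend (vals, last) (pvDigits (vals.getD n1 0 + vals.getD n2 0))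
    if (p.2 : Int) ≥ total - 1 then
      (p.1, pvWalkBack (total - 1) (p.2 + 2) p.2)
    else
      pvLoopA total f p.1
        (pvWalkRight p.1.length n1 (vals.getD n1 0 + 1).toNat)
        (pvWalkRight p.1.length n2 (vals.getD n2 0 + 1).toNat)
        p.2
-- `for i in range(N): result = str(last.val) + result; last = last.left`
def pvResultA (vals : List Int) : Nat → Nat → String → String
  | 0, _, acc => acc
  | m + 1, k, acc => pvResultA vals m (pvLeft k) (PySem.Int.toStr (vals.getD k 0) ++ acc)

def process (steps : Int) (first : Int) (second : Int) (N : Int) : String :=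
  let r := pvLoopA (steps + N) ((steps + N).toNat + 1) [first, second] 0 1 1
  pvResultA r.1 N.toNat r.2 ""

-- ===== PORT B =====
-- int(c) on one character of str(s); none = ValueError lies outside Pre_process
def pvDigitB (c : Char) : Int := (PySem.Int.ofStr? (String.ofList [c])).getD 0
-- `while len(scores) < total:` (fuel; each pass appends, so the supplied fuel suffices)
def pvLoopB (total : Int) : Nat → List Int → Nat → Nat → List Int
  | 0, scores, _, _ => scores
  | f + 1, scores, i1, i2 =>
    if (scores.length : Int) < total then
      let s := scores.getD i1 0 + scores.getD i2 0
      let scores' := scores ++ (PySem.Int.toStr s).toList.map pvDigitB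
      -- i1 = (i1 + 1 + scores[i1]) % len(scores), with Python's % (PySem.Int.mod);
      -- the divisor len(scores) is positive, so the result is a valid Nat index
      pvLoopB total f scores'
        (PySem.Int.mod ((i1 : Int) + 1 + scores'.getD i1 0) (scores'.length : Int)).toNat
        (PySem.Int.mod ((i2 : Int) + 1 + scores'.getD i2 0) (scores'.length : Int)).toNat
    else scores

def process_alt (steps : Int) (first : Int) (second : Int) (N : Int) : String :=
  let scores := pvLoopB (steps + N) ((steps + N).toNat + 1) [first, second] 0 1
  PySem.Str.join "" ((PySem.List.slice scores (some steps) (some (steps + N))).map PySem.Int.toStr)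

-- ===== PRECONDITION & SPEC =====
-- Pre_process keeps the natural domain: nonnegative steps, first, second with steps+N ≥ 1.
-- Outside it A diverges (steps+N ≤ 0: the backtrack loop chases a target index that never
-- occurs), raises ValueError once a sum goes negative (as does B), or — for negative steps —
-- returns strings shaped by the accident that the head node's left pointer wraps to node 1;
-- see the cited examples.
def Pre_process (steps : Int) (first : Int) (second : Int) (N : Int) : Prop :=
  0 ≤ steps ∧ 1 ≤ steps + N ∧ 0 ≤ first ∧ 0 ≤ second
instance (steps : Int) (first : Int) (second : Int) (N : Int) : Decidable (Pre_process steps first second N) := by unfold Pre_process; infer_instance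
def pvWitness_process : Int × Int × Int × Int := (5, 3, 7, 10)

def Spec_process (steps : Int) (first : Int) (second : Int) (N : Int) (out : String) : Prop := out = process_alt steps first second N
instance (steps : Int) (first : Int) (second : Int) (N : Int) (out : String) : Decidable (Spec_process steps first second N out) := by unfold Spec_process; infer_instance

-- ===== CLAIM (what is proved, stated in full; the proofs are below) =====
def Claim_equal_process : Prop := ∀ (steps : Int) (first : Int) (second : Int) (N : Int), Dom_process steps first second N → Pre_process steps first second N → Spec_process steps first second N (process steps first second N)

-- ===== LEMMAS AND PROOFS =====

-- every character Nat.toDigitsCore emits is a digit char (or was already in the accumulator)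
lemma pvToDigitsCore_mem : ∀ (f n : Nat) (l : List Char) (c : Char),
    c ∈ Nat.toDigitsCore 10 f n l → c ∈ l ∨ ∃ k, k < 10 ∧ c = Nat.digitChar k := by
  intro f
  induction f with
  | zero => intro n l c h; simp only [Nat.toDigitsCore] at h; exact Or.inl h
  | succ f ih =>
    intro n l c h
    simp only [Nat.toDigitsCore] at h
    split at h
    · rcases List.mem_cons.mp h with h | h
      · exact Or.inr ⟨n % 10, Nat.mod_lt _ (by omega), h⟩
      · exact Or.inl h
    · rcases ih _ _ _ h with h | h
      · rcases List.mem_cons.mp h with h | h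
        · exact Or.inr ⟨n % 10, Nat.mod_lt _ (by omega), h⟩
        · exact Or.inl h
      · exact Or.inr h

lemma pvToDigitsCore_ne_nil : ∀ (f n : Nat) (l : List Char), l ≠ [] →
    Nat.toDigitsCore 10 f n l ≠ [] := by
  intro f
  induction f with
  | zero => intro n l h; simpa [Nat.toDigitsCore] using h
  | succ f ih =>
    intro n l h
    simp only [Nat.toDigitsCore]
    split
    · simp
    · exact ih _ _ (by simp)

lemma pvToDigits_ne_nil (n : Nat) : Nat.toDigits 10 n ≠ [] := by
  rw [Nat.toDigits, Nat.toDigitsCore]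
  split
  · simp
  · exact pvToDigitsCore_ne_nil _ _ _ (by simp)

lemma pvDigits_eq_nonneg (s : Int) (h : 0 ≤ s) :
    pvDigits s = (Nat.toDigits 10 s.toNat).map pvDigit := by
  unfold pvDigits
  rw [PySem.Int.toList_toStr]
  unfold PySem.Int.toChars
  rw [if_neg (by omega)]

lemma pvToStrChars_ne_nil (s : Int) : (PySem.Int.toStr s).toList ≠ [] := by
  rw [PySem.Int.toList_toStr]
  unfold PySem.Int.toChars
  split
  · simp
  · exact pvToDigits_ne_nil _

lemma pvDigits_ne_nil (s : Int) (h : 0 ≤ s) : pvDigits s ≠ [] := by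
  rw [pvDigits_eq_nonneg s h]
  simpa using pvToDigits_ne_nil s.toNat

lemma pvDigits_nonneg (s : Int) (h : 0 ≤ s) : ∀ d ∈ pvDigits s, 0 ≤ d := by
  rw [pvDigits_eq_nonneg s h]
  intro d hd
  rcases List.mem_map.mp hd with ⟨c, hc, rfl⟩
  rw [Nat.toDigits] at hc
  rcases pvToDigitsCore_mem _ _ _ _ hc with h' | ⟨k, hk, rfl⟩
  · simp at h'
  · interval_cases k <;> decide

lemma pvCharsJoin_nil (l : List (List Char)) : PySem.Chars.join [] l = l.flatten := by
  have h : ∀ l : List (List Char), ([] : List Char).intercalate l = l.flatten := by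
    intro l
    induction l with
    | nil => rfl
    | cons x t ih =>
      cases t with
      | nil => simp [List.intercalate]
      | cons y t' => simp_all [List.intercalate, List.flatten]
  simp [PySem.Chars.join, h]

lemma pvJoinEmpty_nil : PySem.Str.join "" ([] : List String) = "" := by decide

lemma pvJoinEmpty_concat (xs : List String) (y : String) :
    PySem.Str.join "" (xs ++ [y]) = PySem.Str.join "" xs ++ y := by
  apply String.toList_inj.mp
  simp [pysem, pvCharsJoin_nil, String.toList_append]

lemma pvAppend_eq (ds : List Int) : ∀ (vals : List Int) (last : Nat), ds ≠ [] →
    pvAppend (vals, last) ds = (vals ++ ds, vals.length + ds.length - 1) := by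
  induction ds with
  | nil => simp
  | cons d t ih =>
    intro vals last _
    rcases eq_or_ne t [] with ht | ht
    · subst ht; simp [pvAppend]
    · have h2 := ih (vals ++ [d]) vals.length ht
      simp only [pvAppend, List.foldl_cons] at h2 ⊢
      rw [h2, Prod.mk.injEq]
      refine ⟨by simp, ?_⟩
      simp only [List.length_append, List.length_cons, List.length_nil]
      omega

lemma pvWalkRight_eq (len : Nat) (m : Nat) : ∀ k, 0 < len → k < len →
    pvWalkRight len k m = (k + m) % len := by
  induction m with
  | zero => intro k h1 h2; simp [pvWalkRight, Nat.mod_eq_of_lt h2]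
  | succ m ih =>
    intro k h1 h2
    have hr : pvRight len k = (k + 1) % len := by
      by_cases h : k + 1 = len
      · simp [pvRight, h, Nat.mod_self]
      · have hlt : k + 1 < len := by omega
        simp [pvRight, h, Nat.mod_eq_of_lt hlt]
    rw [pvWalkRight, hr, ih _ h1 (Nat.mod_lt _ h1), Nat.mod_add_mod]
    congr 1
    omega

lemma pvWalkBack_eq (t : Nat) : ∀ (f k : Nat), t ≤ k → k - t < f →
    pvWalkBack (t : Int) f k = t := by
  intro f
  induction f with
  | zero => intro k h1 h2; omega
  | succ f ih =>
    intro k h1 h2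
    rw [pvWalkBack]
    split_ifs with hc
    · omega
    · have hk : pvLeft k = k - 1 := by unfold pvLeft; split <;> omega
      rw [hk]
      exact ih _ (by omega) (by omega)

lemma pvLoopB_stop (total : Int) (f : Nat) (scores : List Int) (i1 i2 : Nat)
    (h : total ≤ (scores.length : Int)) : pvLoopB total f scores i1 i2 = scores := by
  cases f <;> simp [pvLoopB, not_lt.mpr h]

lemma pvLoopB_length (total : Int) : ∀ (f : Nat) (scores : List Int) (i1 i2 : Nat),
    total ≤ (scores.length : Int) + f →
    total ≤ ((pvLoopB total f scores i1 i2).length : Int) := by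
  intro f
  induction f with
  | zero => intro scores i1 i2 h; simpa [pvLoopB] using h
  | succ f ih =>
    intro scores i1 i2 h
    rw [pvLoopB]
    by_cases hl : (scores.length : Int) < total
    · rw [if_pos hl]
      apply ih
      have h1 : 1 ≤ ((PySem.Int.toStr (scores.getD i1 0 + scores.getD i2 0)).toList.map pvDigitB).length := by
        simpa using List.length_pos_of_ne_nil (pvToStrChars_ne_nil _)
      simp only [List.length_append]
      push_cast
      omega
    · rw [if_neg hl]; omega

-- the central simulation lemma: while the board is still short, A's pointer step and B's
-- modular step produce the same board and cursors, and A's final backtracked index is total-1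
lemma pvLoop_eq (total : Int) : ∀ (f : Nat) (vals : List Int) (n1 n2 last : Nat),
    (∀ v ∈ vals, 0 ≤ v) → 2 ≤ vals.length → n1 < vals.length → n2 < vals.length →
    (vals.length : Int) < total → total ≤ (vals.length : Int) + f →
    pvLoopA total f vals n1 n2 last = (pvLoopB total f vals n1 n2, (total - 1).toNat) := by
  intro f
  induction f with
  | zero => intro vals n1 n2 last hg h2 hn1 hn2 hlt hf; exfalso; omega
  | succ f ih =>
    intro vals n1 n2 last hg h2 hn1 hn2 hlt hf
    have hm1 : vals.getD n1 0 ∈ vals := by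
      rw [List.getD_eq_getElem vals 0 hn1]; exact List.getElem_mem hn1
    have hm2 : vals.getD n2 0 ∈ vals := by
      rw [List.getD_eq_getElem vals 0 hn2]; exact List.getElem_mem hn2
    have hb1 := hg _ hm1
    have hb2 := hg _ hm2
    have hs0 : 0 ≤ vals.getD n1 0 + vals.getD n2 0 := by omega
    have hne := pvDigits_ne_nil _ hs0
    have hdb := pvDigits_nonneg _ hs0
    have hdl : 1 ≤ (pvDigits (vals.getD n1 0 + vals.getD n2 0)).length :=
      List.length_pos_of_ne_nil hne
    set ds := pvDigits (vals.getD n1 0 + vals.getD n2 0) with hdsdef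
    have hmap : (PySem.Int.toStr (vals.getD n1 0 + vals.getD n2 0)).toList.map pvDigitB
        = ds := rfl
    simp only [pvLoopA, pvLoopB, if_pos hlt, hmap]
    rw [← hdsdef]
    simp only [pvAppend_eq ds vals last hne]
    have hLlen : (vals ++ ds).length = vals.length + ds.length := List.length_append
    have hLpos : 0 < (vals ++ ds).length := by rw [hLlen]; omega
    have hgd1 : (vals ++ ds).getD n1 0 = vals.getD n1 0 := List.getD_append _ _ _ _ hn1
    have hgd2 : (vals ++ ds).getD n2 0 = vals.getD n2 0 := List.getD_append _ _ _ _ hn2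
    by_cases hbr : ((vals.length + ds.length - 1 : Nat) : Int) ≥ total - 1
    · rw [if_pos hbr]
      have htot : total ≤ ((vals ++ ds).length : Int) := by rw [hLlen]; omega
      rw [pvLoopB_stop _ _ _ _ _ htot]
      have hcast : (total - 1) = (((total - 1).toNat : Nat) : Int) := by omega
      rw [hcast, pvWalkBack_eq _ _ _ (by omega) (by omega)]
      simp
    · rw [if_neg hbr]
      have hw1 : pvWalkRight (vals ++ ds).length n1 (vals.getD n1 0 + 1).toNat
          = (PySem.Int.mod ((n1 : Int) + 1 + (vals ++ ds).getD n1 0)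
              ((vals ++ ds).length : Int)).toNat := by
        rw [pvWalkRight_eq _ _ _ hLpos (by rw [hLlen]; omega), hgd1,
            PySem.Int.mod_eq_emod_of_pos (by exact_mod_cast hLpos)]
        have hx : (n1 : Int) + 1 + vals.getD n1 0
            = ((n1 + 1 + (vals.getD n1 0).toNat : Nat) : Int) := by omega
        rw [hx, ← Int.natCast_mod, Int.toNat_natCast]
        congr 1; omega
      have hw2 : pvWalkRight (vals ++ ds).length n2 (vals.getD n2 0 + 1).toNat
          = (PySem.Int.mod ((n2 : Int) + 1 + (vals ++ ds).getD n2 0)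
              ((vals ++ ds).length : Int)).toNat := by
        rw [pvWalkRight_eq _ _ _ hLpos (by rw [hLlen]; omega), hgd2,
            PySem.Int.mod_eq_emod_of_pos (by exact_mod_cast hLpos)]
        have hx : (n2 : Int) + 1 + vals.getD n2 0
            = ((n2 + 1 + (vals.getD n2 0).toNat : Nat) : Int) := by omega
        rw [hx, ← Int.natCast_mod, Int.toNat_natCast]
        congr 1; omega
      rw [hw1, hw2]
      apply ih
      · intro v hv
        rcases List.mem_append.mp hv with h | h
        · exact hg v h
        · exact hdb v h
      · rw [hLlen]; omega
      · rw [← hw1, pvWalkRight_eq _ _ _ hLpos (by rw [hLlen]; omega)]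
        exact Nat.mod_lt _ hLpos
      · rw [← hw2, pvWalkRight_eq _ _ _ hLpos (by rw [hLlen]; omega)]
        exact Nat.mod_lt _ hLpos
      · rw [hLlen]; push_cast; omega
      · rw [hLlen]; push_cast; omega

-- reading N nodes leftwards from index k and prepending is the slice [k+1-N, k+1) joined
lemma pvResultA_eq (vals : List Int) : ∀ (n k : Nat) (acc : String),
    n ≤ k + 1 → k < vals.length →
    pvResultA vals n k acc
      = PySem.Str.join "" (((vals.drop (k + 1 - n)).take n).map PySem.Int.toStr) ++ acc := by
  intro n
  induction n with
  | zero => intro k acc h1 h2; simp [pvResultA, pvJoinEmpty_nil, String.empty_append]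
  | succ m ih =>
    intro k acc h1 h2
    have hmk : m ≤ k := by omega
    have hseg : (vals.drop (k + 1 - (m + 1))).take (m + 1)
        = (vals.drop (k - m)).take m ++ [vals[k]'h2] := by
      have h3 : k + 1 - (m + 1) = k - m := by omega
      rw [h3, List.take_add_one, List.getElem?_drop]
      have h4 : k - m + m = k := by omega
      rw [h4, List.getElem?_eq_getElem h2]
      rfl
    rw [pvResultA, hseg, List.map_append, List.map_singleton, pvJoinEmpty_concat]
    have hgd : vals.getD k 0 = vals[k]'h2 := List.getD_eq_getElem vals 0 h2
    cases k with
    | zero =>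
      have hm0 : m = 0 := by omega
      subst hm0
      rw [pvResultA]
      simp [List.getD, List.getElem?_eq_getElem h2, pvJoinEmpty_nil, String.empty_append]
    | succ j =>
      have hpl : pvLeft (j + 1) = j := by unfold pvLeft; split <;> omega
      rw [hpl, ih j _ (by omega) (by omega)]
      rw [hgd, String.append_assoc]

-- ===== VERDICT (by name: the statement is the Claim_ definition above) =====
theorem process_spec : Claim_equal_process := by
  unfold Claim_equal_process
  intro steps first second N _ hpre
  obtain ⟨hst, h1, hf0, hsc0⟩ := hpre
  unfold Spec_process
  simp only [process, process_alt]
  have hg0 : ∀ v ∈ [first, second], 0 ≤ v := by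
    intro v hv
    rcases List.mem_pair.mp hv with h | h <;> subst h <;> omega
  have hslice : PySem.List.slice (pvLoopB (steps + N) ((steps + N).toNat + 1) [first, second] 0 1)
        (some steps) (some (steps + N))
      = ((pvLoopB (steps + N) ((steps + N).toNat + 1) [first, second] 0 1).drop steps.toNat).take N.toNat := by
    rw [PySem.List.slice_toNat _ hst (by omega)]
    congr 1
    omega
  by_cases hN0 : N ≤ 0
  · -- N ≤ 0: A's result loop runs zero times, B's slice is empty
    have hA : N.toNat = 0 := by omega
    rw [hA, hslice]
    simp only [pvResultA, hA, List.take_zero, List.map_nil]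
    rw [pvJoinEmpty_nil]
  by_cases hc : (([first, second].length : Int)) < steps + N
  · -- at least one loop iteration: the simulation lemma applies
    have hloop := pvLoop_eq (steps + N) ((steps + N).toNat + 1) [first, second] 0 1 1 hg0
      (by simp) (by simp) (by simp) (by simpa using hc) (by push_cast; simp; omega)
    rw [hloop]
    have hlen := pvLoopB_length (steps + N) ((steps + N).toNat + 1) [first, second] 0 1
      (by push_cast; simp; omega)
    have hk : (steps + N - 1).toNat < (pvLoopB (steps + N) ((steps + N).toNat + 1) [first, second] 0 1).length := by
      omega
    rw [pvResultA_eq _ N.toNat _ "" (by omega) hk, String.append_empty, hslice]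
    have hdrop : (steps + N - 1).toNat + 1 - N.toNat = steps.toNat := by omega
    rw [hdrop]
  · -- steps + N ≤ 2: A appends once and backtracks into the initial pair; B never loops
    simp only [List.length_cons, List.length_nil] at hc
    have htot2 : steps + N ≤ 2 := by omega
    rw [pvLoopB_stop _ _ _ _ _ (by simp; omega)] at hslice ⊢
    have hs0 : (0 : Int) ≤ first + second := by omega
    have hne := pvDigits_ne_nil _ hs0
    have hdl : 1 ≤ (pvDigits (first + second)).length := List.length_pos_of_ne_nil hne
    simp only [pvLoopA, List.getD]
    norm_num
    rw [pvAppend_eq _ _ _ hne]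
    have hp2 : ([first, second].length + (pvDigits (first + second)).length - 1)
        = (pvDigits (first + second)).length + 1 := by simp; omega
    rw [hp2]
    rw [if_pos (by push_cast; omega)]
    have hcast : (steps + N - 1) = (((steps + N - 1).toNat : Nat) : Int) := by omega
    rw [hcast, pvWalkBack_eq _ _ _ (by omega) (by omega)]
    have hklt : (steps + N - 1).toNat < ([first, second] ++ pvDigits (first + second)).length := by
      simp; omega
    rw [pvResultA_eq _ N.toNat _ "" (by omega) hklt, String.append_empty]
    have hdrop : (steps + N - 1).toNat + 1 - N.toNat = steps.toNat := by omega
    rw [hdrop]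
    have hseg : (([first, second] ++ pvDigits (first + second)).drop steps.toNat).take N.toNat
        = (([first, second] : List Int).drop steps.toNat).take N.toNat := by
      rw [List.drop_append_of_le_length (by simp; omega),
          List.take_append_of_le_length (by simp; omega)]
    rw [hseg, hslice]
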